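-- pv_equiv track=rewrite | github.com/lumsrouge/Death-First-Search---Episode-1 | second_version.py | select_paths
-- ===== SOURCE A (Python) =====
-- def select_paths(paths): #pb here
--     i = 0
--     current_length = -1
--     selected_index = 0
--     for path in paths:
--         if (len(path) < current_length and len(path) > 1) or current_length == -1:
--             selected_index = i
--             current_length = len(path)
--         i = i + 1
--     return (paths[selected_index])
-- ===== SOURCE B (Python) =====
-- def select_paths(paths):
--     lengths = [len(p) for p in paths]
--     first = lengths[0]
--     candidates = [l for l in lengths if 1 < l < first]
--     m = min(candidates) if candidates else first
--     return paths[lengths.index(m)]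
-- ===== Notes on version B (the rewrite author's own statement) =====
-- stated objective: alternative
-- what changed: Replaces A's decreasing-chain fold with mutable scan state (index counter, current length, selected index) by a declarative pipeline: build the length table, filter candidates shorter than the first path and longer than 1, take their minimum (falling back to the first length), and return the path at the first index of that length.
import Mathlib
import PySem

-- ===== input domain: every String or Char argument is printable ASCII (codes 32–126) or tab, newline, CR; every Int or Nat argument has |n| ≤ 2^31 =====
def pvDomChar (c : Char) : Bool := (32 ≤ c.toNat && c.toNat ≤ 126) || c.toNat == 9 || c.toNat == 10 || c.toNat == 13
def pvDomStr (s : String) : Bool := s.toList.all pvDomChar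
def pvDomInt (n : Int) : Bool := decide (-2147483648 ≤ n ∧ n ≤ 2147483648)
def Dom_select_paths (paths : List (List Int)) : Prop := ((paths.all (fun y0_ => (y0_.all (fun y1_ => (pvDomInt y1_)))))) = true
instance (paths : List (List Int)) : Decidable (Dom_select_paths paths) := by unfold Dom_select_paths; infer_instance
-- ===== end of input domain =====

-- B replaces A's stateful decreasing-chain scan by a table/filter/min/first-index pipeline (alternative decomposition, same cost).


-- ===== PORT A =====
-- state = (i, current_length, selected_index), exactly the three mutable variables of A's loop
def stepA (s : Int × Int × Int) (n : Int) : Int × Int × Int :=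
  if (n < s.2.1 ∧ n > 1) ∨ s.2.1 = -1 then (s.1 + 1, n, s.1) else (s.1 + 1, s.2.1, s.2.2)

def select_paths (paths : List (List Int)) : List Int :=
  let st := paths.foldl (fun s path => stepA s (path.length : Int)) ((0 : Int), (-1 : Int), (0 : Int))
  (PySem.List.pyGet? paths st.2.2).getD []

-- ===== PORT B =====
def select_paths_alt (paths : List (List Int)) : List Int :=
  let lengths := paths.map (fun p => (p.length : Int))
  let first := (PySem.List.pyGet? lengths 0).getD 0
  let candidates := lengths.filter (fun l => decide (1 < l ∧ l < first))
  let m := if candidates.isEmpty then first else (PySem.List.min? candidates (fun x => x)).getD first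
  (PySem.List.pyGet? paths (((PySem.List.index? lengths m).getD 0 : Nat) : Int)).getD []

-- ===== PRECONDITION & SPEC =====
-- Pre_ excludes only the empty list, on which both A and B raise IndexError (paths[selected_index] / lengths[0]).
def Pre_select_paths (paths : List (List Int)) : Prop := paths ≠ []
instance (paths : List (List Int)) : Decidable (Pre_select_paths paths) := by unfold Pre_select_paths; infer_instance
def pvWitness_select_paths : List (List Int) := [[1, 2], [3]]

def Spec_select_paths (paths : List (List Int)) (out : List Int) : Prop := out = select_paths_alt paths
instance (paths : List (List Int)) (out : List Int) : Decidable (Spec_select_paths paths out) := by unfold Spec_select_paths; infer_instance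

-- ===== CLAIM (what is proved, stated in full; the proofs are below) =====
def Claim_equal_select_paths : Prop := ∀ (paths : List (List Int)), Dom_select_paths paths → Pre_select_paths paths → Spec_select_paths paths (select_paths paths)

-- ===== LEMMAS AND PROOFS =====

-- the value A's loop converges to: min of the lengths in t that are >1 and < l0, else l0
def mval (l0 : Int) (t : List Int) : Int :=
  (t.filter (fun l => decide (1 < l ∧ l < l0))).foldl min l0

lemma foldl_min_le_init (l : List Int) (a : Int) : l.foldl min a ≤ a := by
  induction l generalizing a with
  | nil => simp
  | cons x xs ih => exact le_trans (ih (min a x)) (min_le_left _ _)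

lemma foldl_min_le_mem {x : Int} (l : List Int) (a : Int) (hx : x ∈ l) : l.foldl min a ≤ x := by
  induction l generalizing a with
  | nil => simp at hx
  | cons y ys ih =>
    rcases List.mem_cons.1 hx with h | h
    · subst h; exact le_trans (foldl_min_le_init ys (min a x)) (min_le_right _ _)
    · exact ih (min a y) h

lemma foldl_min_mem (l : List Int) (a : Int) : l.foldl min a = a ∨ l.foldl min a ∈ l := by
  induction l generalizing a with
  | nil => simp
  | cons x xs ih =>
    rcases ih (min a x) with h | h
    · rcases min_choice a x with hm | hm
      · left; rw [List.foldl_cons, h, hm]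
      · right; rw [List.foldl_cons, h, hm]; exact List.mem_cons_self
    · right; exact List.mem_cons_of_mem _ h

lemma mval_le (l0 : Int) (t : List Int) : mval l0 t ≤ l0 :=
  foldl_min_le_init _ _

lemma mval_cases (l0 : Int) (t : List Int) :
    mval l0 t = l0 ∨ (1 < mval l0 t ∧ mval l0 t < l0 ∧ mval l0 t ∈ t) := by
  rcases foldl_min_mem (t.filter (fun l => decide (1 < l ∧ l < l0))) l0 with h | h
  · left; exact h
  · right
    have := List.of_mem_filter h
    simp only [decide_eq_true_eq] at this
    exact ⟨this.1, this.2, List.mem_of_mem_filter h⟩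

lemma mval_mem (l0 : Int) (t : List Int) : mval l0 t ∈ l0 :: t := by
  rcases mval_cases l0 t with h | h
  · simp [h]
  · exact List.mem_cons_of_mem _ h.2.2

lemma mval_nonneg (l0 : Int) (h0 : 0 ≤ l0) (t : List Int) : 0 ≤ mval l0 t := by
  rcases mval_cases l0 t with h | h
  · omega
  · omega

-- characterisation of A's loop: after scanning l0 :: t the state is
-- (number scanned, mval l0 t, first index of mval l0 t in l0 :: t)
lemma foldA (l0 : Int) (h0 : 0 ≤ l0) (t : List Int) :
    (l0 :: t).foldl stepA ((0 : Int), (-1 : Int), (0 : Int)) =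
      (((l0 :: t).length : Int), mval l0 t,
        (((PySem.List.index? (l0 :: t) (mval l0 t)).getD 0 : Nat) : Int)) := by
  induction t using List.reverseRecOn with
  | nil =>
    simp [stepA, mval]
  | append_singleton t x ih =>
    have hrw : l0 :: (t ++ [x]) = (l0 :: t) ++ [x] := by simp
    rw [hrw, List.foldl_append, ih]
    have hm_le := mval_le l0 t
    have hm_nn := mval_nonneg l0 h0 t
    by_cases hc : x < mval l0 t ∧ x > 1
    · -- new strict minimum: A selects index (l0::t).length, mval becomes x
      have hx_notmem : x ∉ l0 :: t := by
        intro hmem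
        rcases List.mem_cons.1 hmem with h | h
        · omega
        · have : mval l0 t ≤ x := by
            apply foldl_min_le_mem
            simp only [List.mem_filter, decide_eq_true_eq]
            exact ⟨h, hc.2, by omega⟩
          omega
      have hmv : mval l0 (t ++ [x]) = x := by
        unfold mval
        rw [List.filter_append]
        have hone : List.filter (fun l => decide (1 < l ∧ l < l0)) [x] = [x] := by
          simp only [List.filter_cons, List.filter_nil, decide_eq_true_eq]
          rw [if_pos ⟨hc.2, by omega⟩]
        rw [hone, List.foldl_append]
        simp only [List.foldl_cons, List.foldl_nil]
        have h1 : (List.filter (fun l => decide (1 < l ∧ l < l0)) t).foldl min l0 = mval l0 t := rfl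
        rw [h1]
        omega
      have hidx : PySem.List.index? ((l0 :: t) ++ [x]) x = some (l0 :: t).length :=
        PySem.List.index?_append_singleton_self _ _ hx_notmem
      rw [hmv, hidx]
      simp only [List.foldl_cons, List.foldl_nil, stepA]
      rw [if_pos (Or.inl hc)]
      simp
    · -- no update: mval and index unchanged
      have hmv : mval l0 (t ++ [x]) = mval l0 t := by
        unfold mval
        rw [List.filter_append]
        by_cases hp : 1 < x ∧ x < l0
        · have hone : List.filter (fun l => decide (1 < l ∧ l < l0)) [x] = [x] := by
            simp only [List.filter_cons, List.filter_nil, decide_eq_true_eq]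
            rw [if_pos hp]
          rw [hone, List.foldl_append]
          simp only [List.foldl_cons, List.foldl_nil]
          have h1 : (List.filter (fun l => decide (1 < l ∧ l < l0)) t).foldl min l0 = mval l0 t := rfl
          rw [h1]
          omega
        · have hzero : List.filter (fun l => decide (1 < l ∧ l < l0)) [x] = [] := by
            simp only [List.filter_cons, List.filter_nil, decide_eq_true_eq]
            rw [if_neg hp]
          rw [hzero, List.append_nil]
      have hidx : PySem.List.index? ((l0 :: t) ++ [x]) (mval l0 t) =
          PySem.List.index? (l0 :: t) (mval l0 t) :=
        PySem.List.index?_append_of_mem _ (mval_mem l0 t)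
      rw [hmv, hidx]
      simp only [List.foldl_cons, List.foldl_nil, stepA]
      have hcond : ¬((x < mval l0 t ∧ x > 1) ∨ mval l0 t = -1) := by
        rintro (h | h)
        · exact hc h
        · omega
      rw [if_neg hcond]
      simp

-- B's minimum computation equals mval
lemma alt_m_eq (l0 : Int) (t : List Int) :
    (if ((l0 :: t).filter (fun l => decide (1 < l ∧ l < l0))).isEmpty then l0
     else (PySem.List.min? ((l0 :: t).filter (fun l => decide (1 < l ∧ l < l0))) (fun x => x)).getD l0) =
      mval l0 t := by
  have hhead : (l0 :: t).filter (fun l => decide (1 < l ∧ l < l0)) =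
      t.filter (fun l => decide (1 < l ∧ l < l0)) := by
    simp only [List.filter_cons, decide_eq_true_eq]
    rw [if_neg (by omega)]
  rw [hhead]
  rcases hft : t.filter (fun l => decide (1 < l ∧ l < l0)) with _ | ⟨c, cs⟩
  · unfold mval
    rw [hft]
    rfl
  · have hc : c ∈ t.filter (fun l => decide (1 < l ∧ l < l0)) := by rw [hft]; simp
    have hcp := List.of_mem_filter hc
    simp only [decide_eq_true_eq] at hcp
    rw [PySem.List.min?_id_cons]
    simp only [List.isEmpty_cons, Option.getD_some, Bool.false_eq_true, if_false]
    unfold mval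
    rw [hft]
    simp only [List.foldl_cons]
    rw [show min l0 c = c by omega]

theorem select_paths_spec : Claim_equal_select_paths := by
  intro paths _ hpre
  rcases paths with _ | ⟨p0, rest⟩
  · exact absurd rfl hpre
  unfold Spec_select_paths select_paths select_paths_alt
  have hfold : (p0 :: rest).foldl (fun s p => stepA s ((p.length : Int))) ((0:Int), (-1:Int), (0:Int))
      = (((p0.length : Int)) :: rest.map (fun p => (p.length : Int))).foldl stepA ((0:Int), (-1:Int), (0:Int)) := by
    rw [← List.foldl_map]
    rfl
  rw [hfold, foldA (p0.length : Int) (by positivity) (rest.map (fun p => (p.length : Int)))]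
  simp only [List.map_cons, PySem.List.pyGet?_zero_cons, Option.getD_some]
  rw [alt_m_eq (p0.length : Int) (rest.map (fun p => (p.length : Int)))]
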